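-- pv_equiv track=rewrite | github.com/AmyLu0828/CS229_Trials | analysis/parser.py | _balanced_paren
-- ===== SOURCE A (Python) =====
-- def _balanced_paren(text: str, start: int) -> int:
--     """Return index just past the matching `)` for the `(` at `text[start-1]`.
--
--     `start` should point to the char after the opening paren. Returns -1 on
--     failure (unbalanced).
--     """
--     depth = 1
--     i = start
--     n = len(text)
--     in_str: str | None = None
--     while i < n:
--         ch = text[i]
--         if in_str:
--             if ch == "\\":
--                 i += 2
--                 continue
--             if ch == in_str:
--                 in_str = None
--             i += 1
--             continue
--         if ch in ("'", '"'):
--             in_str = ch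
--             i += 1
--             continue
--         if ch == "(":
--             depth += 1
--         elif ch == ")":
--             depth -= 1
--             if depth == 0:
--                 return i + 1
--         i += 1
--     return -1
-- ===== SOURCE B (Python) =====
-- def _skip_string(text, j, quote):
--     """Return the index just past the unescaped closing quote scanning from j,
--     or len(text) if the string never closes ('\\' consumes two positions)."""
--     n = len(text)
--     while j < n:
--         c = text[j]
--         if c == "\\":
--             j += 2
--         elif c == quote:
--             return j + 1
--         else:
--             j += 1
--     return n
--
--
-- def _balanced_paren(text: str, start: int) -> int:
--     """Recursive descent: no depth counter. The first unmatched ')' closes the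
--     current group; a nested '(' is skipped by a recursive call returning the
--     index just past its matching ')'."""
--     i = start
--     n = len(text)
--     while i < n:
--         ch = text[i]
--         if ch == ")":
--             return i + 1
--         if ch == "(":
--             j = _balanced_paren(text, i + 1)
--             if j == -1:
--                 return -1
--             i = j
--         elif ch in ("'", '"'):
--             i = _skip_string(text, i + 1, ch)
--         else:
--             i += 1
--     return -1
-- ===== Notes on version B (the rewrite author's own statement) =====
-- stated objective: alternative
-- what changed: A's single state-machine scan with a depth counter and an in_str flag is replaced by a recursive-descent parser: no depth variable at all - the current group closes at the first unmatched ')', each nested '(' is consumed by a recursive call returning the index just past its match, quoted strings by a _skip_string helper. Pre_ excludes negative start, where Python's negative-index wraparound makes A rescan the text and -1 becomes ambiguous between an index result and the failure code.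
-- outside the precondition, e.g. on _balanced_paren('b())', -4): A returns 0, B returns -1; on _balanced_paren('b)()\\', -3): A returns 2, B returns -1
import Mathlib
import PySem

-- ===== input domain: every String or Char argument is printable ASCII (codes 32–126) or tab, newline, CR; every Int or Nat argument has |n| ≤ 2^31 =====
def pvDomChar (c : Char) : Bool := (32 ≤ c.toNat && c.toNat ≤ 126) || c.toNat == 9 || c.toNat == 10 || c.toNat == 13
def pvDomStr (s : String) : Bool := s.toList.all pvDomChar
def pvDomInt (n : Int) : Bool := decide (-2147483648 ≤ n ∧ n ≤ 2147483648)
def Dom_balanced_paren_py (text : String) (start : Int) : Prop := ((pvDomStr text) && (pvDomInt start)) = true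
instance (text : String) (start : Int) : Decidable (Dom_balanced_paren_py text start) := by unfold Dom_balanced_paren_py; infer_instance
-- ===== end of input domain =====

-- B replaces A's depth-counter/in_str state machine by a recursive-descent parser
-- (nested '(' handled by a recursive call, strings by a skip helper); alternative, not faster.

-- ===== PORT A =====
-- A's while loop with state (i, depth, in_str), branches in A's order; the Nat fuel
-- (initially (n - start).toNat, i advances by ≥ 1 per iteration) only makes the loop total.
def pvLoopA (text : List Char) (n : Int) : Nat → Int → Int → Option Char → Int
  | 0, _, _, _ => -1
  | fuel + 1, i, depth, instr =>
    if i < n then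
      match PySem.List.pyGet? text i with
      | none => -2  -- Python raises IndexError here; excluded by Pre_
      | some ch =>
        match instr with
        | some q =>
          if ch = '\\' then pvLoopA text n fuel (i + 2) depth (some q)
          else if ch = q then pvLoopA text n fuel (i + 1) depth none
          else pvLoopA text n fuel (i + 1) depth (some q)
        | none =>
          if ch = '\'' ∨ ch = '"' then pvLoopA text n fuel (i + 1) depth (some ch)
          else if ch = '(' then pvLoopA text n fuel (i + 1) (depth + 1) none
          else if ch = ')' then
            if depth - 1 = 0 then i + 1 else pvLoopA text n fuel (i + 1) (depth - 1) none
          else pvLoopA text n fuel (i + 1) depth none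
    else -1

def balanced_paren_py (text : String) (start : Int) : Int :=
  pvLoopA text.toList (text.toList.length : Int) (((text.toList.length : Int) - start).toNat) start 1 none

-- ===== PORT B =====
-- Source B's _skip_string: scan from j, '\' advances two, stop just past an unescaped closing
-- quote, else n; fuel as in pvLoopA.
def pvSkipStr (text : List Char) (n : Int) : Nat → Int → Char → Int
  | 0, _, _ => n
  | fuel + 1, j, quote =>
    if j < n then
      match PySem.List.pyGet? text j with
      | none => n  -- Python raises IndexError here; excluded by Pre_
      | some c =>
        if c = '\\' then pvSkipStr text n fuel (j + 2) quote
        else if c = quote then j + 1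
        else pvSkipStr text n fuel (j + 1) quote
    else n

-- Source B's recursive descent: no depth counter; ')' closes the current group, '(' is consumed
-- by a recursive call; the while loop is the tail recursion, the Python recursion the nested call.
def pvRecB (text : List Char) (n : Int) : Nat → Int → Int
  | 0, _ => -1
  | fuel + 1, i =>
    if i < n then
      match PySem.List.pyGet? text i with
      | none => -2  -- Python raises IndexError here; excluded by Pre_
      | some ch =>
        if ch = ')' then i + 1
        else if ch = '(' then
          let j := pvRecB text n fuel (i + 1)
          if j = -1 then -1 else pvRecB text n fuel j
        else if ch = '\'' ∨ ch = '"' then pvRecB text n fuel (pvSkipStr text n fuel (i + 1) ch)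
        else pvRecB text n fuel (i + 1)
    else -1

def balanced_paren_py_alt (text : String) (start : Int) : Int :=
  pvRecB text.toList (text.toList.length : Int) (((text.toList.length : Int) - start).toNat) start

-- ===== PRECONDITION & SPEC =====
-- Pre_ excludes negative start: there Python's negative-index wraparound makes A rescan the
-- text and -1 becomes ambiguous between an index result and B's failure code (and A raises
-- IndexError when start < -len(text)).
def Pre_balanced_paren_py (text : String) (start : Int) : Prop := 0 ≤ start
instance (text : String) (start : Int) : Decidable (Pre_balanced_paren_py text start) := by
  unfold Pre_balanced_paren_py; infer_instance

def pvWitness_balanced_paren_py : String × Int := ("a('x)')z", 2)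

def Spec_balanced_paren_py (text : String) (start : Int) (out : Int) : Prop := out = balanced_paren_py_alt text start
instance (text : String) (start : Int) (out : Int) : Decidable (Spec_balanced_paren_py text start out) := by unfold Spec_balanced_paren_py; infer_instance

-- ===== CLAIM (what is proved, stated in full; the proofs are below) =====
def Claim_equal_balanced_paren_py : Prop := ∀ (text : String) (start : Int), Dom_balanced_paren_py text start → Pre_balanced_paren_py text start → Spec_balanced_paren_py text start (balanced_paren_py text start)

-- ===== LEMMAS AND PROOFS =====

theorem pv_get_some (text : List Char) (i : Int) (h0 : -(text.length : Int) ≤ i)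
    (h1 : i < (text.length : Int)) : ∃ c, PySem.List.pyGet? text i = some c := by
  cases hg : PySem.List.pyGet? text i with
  | some c => exact ⟨c, rfl⟩
  | none =>
    rw [PySem.List.pyGet?_eq_none_iff] at hg
    exact absurd (by unfold PySem.Raise.InRange; omega) hg

-- pvSkipStr's result is n or strictly past its starting index, and never exceeds max n (j+1).
theorem pvSkipStr_lb (text : List Char) (n : Int) (fuel : Nat) (j : Int) (q : Char) :
    (pvSkipStr text n fuel j q = n ∨ j + 1 ≤ pvSkipStr text n fuel j q) ∧
      pvSkipStr text n fuel j q ≤ n := by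
  induction fuel generalizing j with
  | zero => rw [pvSkipStr]; omega
  | succ fuel ih =>
    rw [pvSkipStr]
    by_cases hin : j < n
    · rw [if_pos hin]
      cases hg : PySem.List.pyGet? text j with
      | none => exact ⟨Or.inl rfl, le_rfl⟩
      | some c =>
        by_cases b1 : c = '\\'
        · simp only [if_pos b1]
          have := ih (j + 2)
          omega
        · by_cases b2 : c = q
          · simp only [if_neg b1, if_pos b2]; omega
          · simp only [if_neg b1, if_neg b2]
            have := ih (j + 1)
            omega
    · rw [if_neg hin]; omega

-- pvLoopA does not depend on the fuel, as long as the fuel covers the remaining scan.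
theorem pvLoopA_fuel (text : List Char) (n : Int) (f g : Nat) (i depth : Int)
    (instr : Option Char) (hf : (n - i).toNat ≤ f) (hg : (n - i).toNat ≤ g) :
    pvLoopA text n f i depth instr = pvLoopA text n g i depth instr := by
  induction f generalizing g i depth instr with
  | zero =>
    have hni : ¬ i < n := by omega
    cases g <;> simp [pvLoopA, hni]
  | succ f ih =>
    cases g with
    | zero =>
      have hni : ¬ i < n := by omega
      simp [pvLoopA, hni]
    | succ g =>
      rw [pvLoopA, pvLoopA]
      by_cases hin : i < n
      · rw [if_pos hin, if_pos hin]
        cases hch : PySem.List.pyGet? text i with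
        | none => rfl
        | some ch =>
          cases instr with
          | some q =>
            by_cases b1 : ch = '\\'
            · simp only [if_pos b1]; exact ih g (i + 2) depth (some q) (by omega) (by omega)
            · by_cases b2 : ch = q
              · simp only [if_neg b1, if_pos b2]
                exact ih g (i + 1) depth none (by omega) (by omega)
              · simp only [if_neg b1, if_neg b2]
                exact ih g (i + 1) depth (some q) (by omega) (by omega)
          | none =>
            by_cases b1 : ch = '\'' ∨ ch = '"'
            · simp only [if_pos b1]; exact ih g (i + 1) depth (some ch) (by omega) (by omega)
            · by_cases b2 : ch = '('
              · simp only [if_neg b1, if_pos b2]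
                exact ih g (i + 1) (depth + 1) none (by omega) (by omega)
              · by_cases b3 : ch = ')'
                · simp only [if_neg b1, if_neg b2, if_pos b3]
                  by_cases b4 : depth - 1 = 0
                  · simp [b4]
                  · simp only [if_neg b4]
                    exact ih g (i + 1) (depth - 1) none (by omega) (by omega)
                · simp only [if_neg b1, if_neg b2, if_neg b3]
                  exact ih g (i + 1) depth none (by omega) (by omega)
      · rw [if_neg hin, if_neg hin]

-- In string mode, A's loop scans exactly to pvSkipStr's result and continues in normal mode.
theorem pvLoopA_string (text : List Char) (n : Int) (f : Nat) (j depth : Int) (q : Char)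
    (hn : n = (text.length : Int)) (hj : -n ≤ j) (hf : (n - j).toNat ≤ f) :
    pvLoopA text n f j depth (some q) = pvLoopA text n f (pvSkipStr text n f j q) depth none := by
  induction f generalizing j with
  | zero => simp [pvLoopA]
  | succ f ih =>
    rw [pvLoopA, pvSkipStr]
    by_cases hin : j < n
    · rw [if_pos hin, if_pos hin]
      obtain ⟨ch, hch⟩ := pv_get_some text j (by omega) (by omega)
      rw [hch]
      by_cases b1 : ch = '\\'
      · simp only [if_pos b1]
        have hsk := pvSkipStr_lb text n f (j + 2) q
        rw [ih (j + 2) (by omega) (by omega)]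
        exact pvLoopA_fuel text n f (f + 1) _ depth none (by omega) (by omega)
      · by_cases b2 : ch = q
        · simp only [if_neg b1, if_pos b2]
          exact pvLoopA_fuel text n f (f + 1) (j + 1) depth none (by omega) (by omega)
        · simp only [if_neg b1, if_neg b2]
          have hsk := pvSkipStr_lb text n f (j + 1) q
          rw [ih (j + 1) (by omega) (by omega)]
          exact pvLoopA_fuel text n f (f + 1) _ depth none (by omega) (by omega)
    · rw [if_neg hin, if_neg hin, pvLoopA, if_neg (lt_irrefl n)]

-- pvRecB's result is -1 or strictly past its starting index (under n = length, 0 ≤ i).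
theorem pvRecB_lb (text : List Char) (n : Int) (f : Nat) (i : Int)
    (hn : n = (text.length : Int)) (hi : 0 ≤ i) :
    pvRecB text n f i = -1 ∨ i + 1 ≤ pvRecB text n f i := by
  induction f generalizing i with
  | zero => rw [pvRecB]; omega
  | succ f ih =>
    rw [pvRecB]
    by_cases hin : i < n
    · rw [if_pos hin]
      obtain ⟨ch, hch⟩ := pv_get_some text i (by omega) (by omega)
      rw [hch]
      by_cases b1 : ch = ')'
      · simp only [if_pos b1]; omega
      · by_cases b2 : ch = '('
        · simp only [if_neg b1, if_pos b2]
          rcases ih (i + 1) (by omega) with h1 | h1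
          · simp [h1]
          · rw [if_neg (by omega : ¬ pvRecB text n f (i + 1) = -1)]
            rcases ih (pvRecB text n f (i + 1)) (by omega) with h2 | h2 <;> omega
        · by_cases b3 : ch = '\'' ∨ ch = '"'
          · simp only [if_neg b1, if_neg b2, if_pos b3]
            have hsk := pvSkipStr_lb text n f (i + 1) ch
            have hn0 : 0 ≤ n := by omega
            rcases ih (pvSkipStr text n f (i + 1) ch) (by omega) with h | h <;> omega
          · simp only [if_neg b1, if_neg b2, if_neg b3]
            rcases ih (i + 1) (by omega) with h | h <;> omega
    · rw [if_neg hin]; omega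

-- The core correspondence: A's depth-counting loop equals a chain of recursive-descent calls.
theorem pv_main (text : List Char) (n : Int) (f : Nat) (i depth : Int)
    (hn : n = (text.length : Int)) (hi : 0 ≤ i) (hf : (n - i).toNat ≤ f) (hd : 1 ≤ depth) :
    pvLoopA text n f i depth none =
      (if pvRecB text n f i = -1 then -1
       else if depth = 1 then pvRecB text n f i
       else pvLoopA text n f (pvRecB text n f i) (depth - 1) none) := by
  induction f generalizing i depth with
  | zero => simp [pvLoopA, pvRecB]
  | succ f ih =>
    rw [pvLoopA, pvRecB]
    by_cases hin : i < n
    · rw [if_pos hin, if_pos hin]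
      obtain ⟨ch, hch⟩ := pv_get_some text i (by omega) (by omega)
      rw [hch]
      by_cases b1 : ch = '\'' ∨ ch = '"'
      · -- quote: A skips the string via pvLoopA_string, then IH at the skip result
        have hq : ¬ ch = ')' := by rcases b1 with h | h <;> simp [h]
        have hp : ¬ ch = '(' := by rcases b1 with h | h <;> simp [h]
        simp only [if_pos b1, if_neg hq, if_neg hp]
        have hsk := pvSkipStr_lb text n f (i + 1) ch
        have hn0 : 0 ≤ n := by omega
        rw [pvLoopA_string text n f (i + 1) depth ch hn (by omega) (by omega)]
        rw [ih (pvSkipStr text n f (i + 1) ch) depth (by omega) (by omega) hd]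
        set r := pvRecB text n f (pvSkipStr text n f (i + 1) ch) with hr
        by_cases h1 : r = -1
        · simp [h1]
        · rw [if_neg h1, if_neg h1]
          by_cases h2 : depth = 1
          · simp [h2]
          · rw [if_neg h2, if_neg h2]
            have hlb := pvRecB_lb text n f (pvSkipStr text n f (i + 1) ch) hn (by omega)
            exact pvLoopA_fuel text n f (f + 1) r (depth - 1) none (by omega) (by omega)
      · by_cases b2 : ch = '('
        · -- '(' : A increments depth; B recurses then continues from the returned index
          have hq : ¬ ch = ')' := by simp [b2]
          simp only [if_neg b1, if_pos b2, if_neg hq]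
          rw [ih (i + 1) (depth + 1) (by omega) (by omega) (by omega)]
          set r1 := pvRecB text n f (i + 1) with hr1
          by_cases h1 : r1 = -1
          · simp [h1]
          · rw [if_neg h1]
            have hlb1 := pvRecB_lb text n f (i + 1) hn (by omega)
            rw [if_neg (by omega : ¬ depth + 1 = 1)]
            have heq : depth + 1 - 1 = depth := by omega
            rw [heq]
            rw [ih r1 depth (by omega) (by omega) hd]
            set r2 := pvRecB text n f r1 with hr2
            simp only [if_neg h1]
            by_cases h2 : r2 = -1
            · simp [h2]
            · rw [if_neg h2, if_neg h2]
              by_cases h3 : depth = 1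
              · simp [h3]
              · rw [if_neg h3, if_neg h3]
                have hlb2 := pvRecB_lb text n f r1 hn (by omega)
                exact pvLoopA_fuel text n f (f + 1) r2 (depth - 1) none (by omega) (by omega)
        · by_cases b3 : ch = ')'
          · -- ')' : closes the current group (depth = 1) or decrements A's counter
            simp only [if_neg b1, if_neg b2, if_pos b3]
            by_cases h2 : depth = 1
            · rw [if_pos (by omega : depth - 1 = 0)]
              rw [if_neg (by omega : ¬ (i + 1 : Int) = -1), if_pos h2]
            · rw [if_neg (by omega : ¬ depth - 1 = 0)]
              rw [if_neg (by omega : ¬ (i + 1 : Int) = -1), if_neg h2]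
              exact pvLoopA_fuel text n f (f + 1) (i + 1) (depth - 1) none (by omega) (by omega)
          · -- ordinary character
            simp only [if_neg b1, if_neg b2, if_neg b3]
            rw [ih (i + 1) depth (by omega) (by omega) hd]
            set r := pvRecB text n f (i + 1) with hr
            by_cases h1 : r = -1
            · simp [h1]
            · rw [if_neg h1, if_neg h1]
              by_cases h2 : depth = 1
              · simp [h2]
              · rw [if_neg h2, if_neg h2]
                have hlb := pvRecB_lb text n f (i + 1) hn (by omega)
                exact pvLoopA_fuel text n f (f + 1) r (depth - 1) none (by omega) (by omega)
    · rw [if_neg hin, if_neg hin]; simp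

-- ===== VERDICT (by name: the statement is the Claim_ definition above) =====
theorem balanced_paren_py_spec : Claim_equal_balanced_paren_py := by
  intro text start _ hpre
  unfold Spec_balanced_paren_py balanced_paren_py balanced_paren_py_alt
  rw [pv_main text.toList _ _ start 1 rfl hpre le_rfl le_rfl]
  by_cases h : pvRecB text.toList (text.toList.length : Int)
      (((text.toList.length : Int) - start).toNat) start = -1
  · rw [if_pos h, h]
  · rw [if_neg h, if_pos rfl]
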